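-- pv_equiv track=rewrite | github.com/solarzone898/BMSbot | matchsticks.py | nocopies
-- ===== SOURCE A (Python) =====
-- def isnat(M):
--     for i in M:
--         k=0
--         for j in i:
--             if j!=0: k=1
--         if k:
--             return False
--     return True
--
-- def nocopies(M):
--     if not isnat(M):
--         x=[]
--         for i in range(len(M)):
--             k=1
--             for j in M[i]:
--                 if j != 0: k = 0
--             if k and i!=0:
--                 break
--             x+=[M[i]]
--         return x
--     if M!=[]:
--         return [M[0]]
--     return []
-- ===== SOURCE B (Python) =====
-- def nocopies(M):
--     for i in range(1, len(M)):
--         if all(v == 0 for v in M[i]):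
--             return M[:i]
--     return M[:]
-- ===== Notes on version B (the rewrite author's own statement) =====
-- stated objective: simpler
-- what changed: Replaces A's two-pass structure (full isnat pre-scan, then an index loop with a flag and break-accumulate into x) with a single scan over indices 1..len(M)-1 that returns the slice M[:i] at the first all-zero row, or a shallow copy M[:] if none.
import Mathlib
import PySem

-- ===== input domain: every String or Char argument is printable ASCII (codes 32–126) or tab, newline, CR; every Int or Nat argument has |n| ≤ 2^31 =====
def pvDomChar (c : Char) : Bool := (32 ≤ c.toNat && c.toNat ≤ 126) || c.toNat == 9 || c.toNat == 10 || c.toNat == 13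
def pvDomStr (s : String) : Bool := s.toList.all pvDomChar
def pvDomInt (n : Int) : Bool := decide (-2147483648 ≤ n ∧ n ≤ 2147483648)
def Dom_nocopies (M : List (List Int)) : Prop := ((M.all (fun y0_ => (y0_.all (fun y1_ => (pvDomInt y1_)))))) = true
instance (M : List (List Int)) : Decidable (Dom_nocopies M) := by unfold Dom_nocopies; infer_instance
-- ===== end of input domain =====

-- B replaces A's two-pass structure (isnat pre-scan, then flag-and-break accumulate loop)
-- with a single scan for the first all-zero row at index ≥ 1, returning a slice (simpler).


-- ===== PORT A =====
-- isnat: per row, flag k set to 1 on any nonzero entry; returns False on first flagged row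
def isnatA : List (List Int) → Bool
  | [] => true
  | i :: rest =>
    let k : Int := i.foldl (fun k j => if j ≠ 0 then 1 else k) 0
    if k ≠ 0 then false else isnatA rest

-- the main loop: for i in range(len(M)): flag k, break on all-zero row with i≠0, else append M[i]
def aLoop (M : List (List Int)) : List Int → List (List Int) → List (List Int)
  | [], x => x
  | i :: rest, x =>
    let row := PySem.List.pyGetD M i []
    let k : Int := row.foldl (fun k j => if j ≠ 0 then 0 else k) 1
    if k ≠ 0 ∧ i ≠ 0 then x else aLoop M rest (x ++ [row])

def nocopies (M : List (List Int)) : List (List Int) :=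
  if ¬ (isnatA M = true) then
    aLoop M (PySem.List.pyRange 0 M.length 1) []
  else if M ≠ [] then [M.headD []] else []

-- ===== PORT B =====
-- for i in range(1, len(M)): if all(v == 0 for v in M[i]): return M[:i];  return M[:]
def bLoop (M : List (List Int)) : List Int → List (List Int)
  | [] => M
  | i :: rest =>
    if (PySem.List.pyGetD M i []).all (fun v => v == 0) then
      PySem.List.slice M none (some i)
    else bLoop M rest

def nocopies_alt (M : List (List Int)) : List (List Int) :=
  bLoop M (PySem.List.pyRange 1 M.length 1)

-- ===== PRECONDITION & SPEC =====
def Spec_nocopies (M : List (List Int)) (out : List (List Int)) : Prop := out = nocopies_alt M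
instance (M : List (List Int)) (out : List (List Int)) : Decidable (Spec_nocopies M out) := by unfold Spec_nocopies; infer_instance

-- ===== CLAIM (what is proved, stated in full; the proofs are below) =====
def Claim_equal_nocopies : Prop := ∀ (M : List (List Int)), Dom_nocopies M → Spec_nocopies M (nocopies M)

-- ===== LEMMAS AND PROOFS =====

-- sticky flag: once any nonzero entry is seen the fold returns c, else the initial value
theorem sticky_fold (c a : Int) (row : List Int) :
    row.foldl (fun k j => if j ≠ 0 then c else k) a
      = if row.all (fun v => v == 0) then a else c := by
  induction row generalizing a with
  | nil => simp
  | cons j t ih =>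
    simp only [List.foldl_cons]
    by_cases hj : j = 0
    · subst hj
      rw [if_neg (by simp), ih]
      simp
    · rw [if_pos hj, ih]
      have h2 : ((j :: t).all (fun v => v == 0)) = false := by simp [hj]
      rw [h2]
      simp

theorem isnatA_eq (M : List (List Int)) :
    isnatA M = M.all (fun r => r.all (fun v => v == 0)) := by
  induction M with
  | nil => rfl
  | cons r t ih =>
    simp only [isnatA, sticky_fold, List.all_cons]
    by_cases h : r.all (fun v => v == 0) = true <;> simp [h, ih]

theorem bLoop_eq (M : List (List Int)) (a : Nat) (ha : 1 ≤ a) :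
    bLoop M (PySem.List.pyRange (a : Int) (M.length : Int) 1)
      = M.take a ++ (M.drop a).takeWhile (fun r => !(r.all (fun v => v == 0))) := by
  by_cases hlt : a < M.length
  · rw [PySem.List.pyRange_one_cons (by exact_mod_cast hlt)]
    have hdrop : M.drop a = M[a] :: M.drop (a + 1) := List.drop_eq_getElem_cons hlt
    simp only [bLoop, PySem.List.pyGetD_natCast, List.getD_eq_getElem?_getD,
      List.getElem?_eq_getElem hlt, Option.getD_some]
    by_cases hz : M[a].all (fun v => v == 0) = true
    · rw [if_pos hz, PySem.List.slice_to_natCast]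
      rw [hdrop, List.takeWhile_cons]
      simp [hz]
    · have hc : ((a : Int) + 1) = ((a + 1 : Nat) : Int) := by push_cast; ring
      rw [if_neg (by simp [hz]), hc, bLoop_eq M (a + 1) (by omega)]
      conv_rhs => rw [hdrop, List.takeWhile_cons]
      simp only [hz, Bool.not_false, if_true]
      rw [List.take_succ_eq_append_getElem hlt, List.append_assoc]
      rfl
  · rw [PySem.List.pyRange_one_eq_nil (by exact_mod_cast Nat.le_of_not_lt hlt)]
    simp [bLoop, List.take_of_length_le (Nat.le_of_not_lt hlt),
      List.drop_of_length_le (Nat.le_of_not_lt hlt)]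

theorem aLoop_eq (M : List (List Int)) (a : Nat) (ha : 1 ≤ a) (x : List (List Int)) :
    aLoop M (PySem.List.pyRange (a : Int) (M.length : Int) 1) x
      = x ++ (M.drop a).takeWhile (fun r => !(r.all (fun v => v == 0))) := by
  by_cases hlt : a < M.length
  · rw [PySem.List.pyRange_one_cons (by exact_mod_cast hlt)]
    have hdrop : M.drop a = M[a] :: M.drop (a + 1) := List.drop_eq_getElem_cons hlt
    simp only [aLoop, sticky_fold, PySem.List.pyGetD_natCast, List.getD_eq_getElem?_getD,
      List.getElem?_eq_getElem hlt, Option.getD_some]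
    by_cases hz : M[a].all (fun v => v == 0) = true
    · rw [if_pos ⟨by simp [hz], by exact_mod_cast Nat.one_le_iff_ne_zero.mp ha⟩]
      rw [hdrop, List.takeWhile_cons]
      simp [hz]
    · have hc : ((a : Int) + 1) = ((a + 1 : Nat) : Int) := by push_cast; ring
      rw [if_neg (by simp [hz]), hc, aLoop_eq M (a + 1) (by omega) (x ++ [M[a]])]
      conv_rhs => rw [hdrop, List.takeWhile_cons]
      simp [hz]
  · rw [PySem.List.pyRange_one_eq_nil (by exact_mod_cast Nat.le_of_not_lt hlt)]
    simp [aLoop, List.drop_of_length_le (Nat.le_of_not_lt hlt)]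

theorem alt_canon (h : List Int) (t : List (List Int)) :
    nocopies_alt (h :: t) = h :: t.takeWhile (fun r => !(r.all (fun v => v == 0))) := by
  unfold nocopies_alt
  have := bLoop_eq (h :: t) 1 (le_refl 1)
  simpa using this

-- ===== VERDICT (by name: the statement is the Claim_ definition above) =====
theorem nocopies_spec : Claim_equal_nocopies := by
  intro M _
  show nocopies M = nocopies_alt M
  cases M with
  | nil => rfl
  | cons h t =>
    rw [alt_canon]
    unfold nocopies
    by_cases hn : isnatA (h :: t) = true
    · rw [if_neg (by simp [hn]), if_pos (by simp)]
      rw [isnatA_eq] at hn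
      simp only [List.all_cons, Bool.and_eq_true] at hn
      cases t with
      | nil => rfl
      | cons r s =>
        have hr : r.all (fun v => v == 0) = true := by
          have h3 := hn.2; simp only [List.all_cons, Bool.and_eq_true] at h3; exact h3.1
        simp [hr]
    · rw [if_pos hn]
      have hcons : PySem.List.pyRange 0 ((h :: t).length : Int) 1
          = 0 :: PySem.List.pyRange 1 ((h :: t).length : Int) 1 := by
        rw [PySem.List.pyRange_one_cons (by push_cast [List.length_cons]; omega)]
        norm_num
      rw [hcons]
      simp only [aLoop, sticky_fold, PySem.List.pyGetD_zero_cons]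
      rw [if_neg (by simp)]
      have h4 := aLoop_eq (h :: t) 1 (le_refl 1) ([] ++ [h])
      simpa using h4
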